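-- pv_equiv track=rewrite | github.com/stpotter16/NURBS-Python | geomdl/.ipynb_checkpoints/utilities-checkpoint.py | make_triangle
-- ===== SOURCE A (Python) =====
-- def make_triangle(points, row_size, col_size):
--     """ Generates a triangular mesh from  linearly ordered list of points.
--
--     :param points: list of points to be ordered
--     :type points: list, tuple
--     :param row_size: number of elements in a row
--     :param row_size: int
--     :param col_size: number of elements in a column
--     :param col_size: int
--     :return: re-ordered points
--     :rtype: list
--     """
--     points2d = []
--     for i in range(0, col_size):
--         row_list = []
--         for j in range(0, row_size):
--             row_list.append(points[j + (i * row_size)])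
--         points2d.append(row_list)
--
--     forward = True
--     triangles = []
--     for col_idx in range(0, col_size - 1):
--         row_idx = 0
--         left_half = True
--         tri_list = []
--         while row_idx < row_size - 1:
--             if left_half:
--                 tri_list.append(points2d[col_idx + 1][row_idx])
--                 tri_list.append(points2d[col_idx][row_idx])
--                 tri_list.append(points2d[col_idx][row_idx + 1])
--                 tri_list.append(points2d[col_idx + 1][row_idx])
--                 left_half = False
--             else:
--                 tri_list.append(points2d[col_idx][row_idx + 1])
--                 tri_list.append(points2d[col_idx + 1][row_idx + 1])
--                 tri_list.append(points2d[col_idx + 1][row_idx])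
--                 left_half = True
--                 row_idx += 1
--         if forward:
--             forward = False
--         else:
--             forward = True
--             tri_list.reverse()
--         triangles += tri_list
--
--     return triangles
-- ===== SOURCE B (Python) =====
-- _OFF = ((1, 0), (0, 0), (0, 1), (1, 0), (0, 1), (1, 1), (1, 0))
--
--
-- def make_triangle(points, row_size, col_size):
--     """Re-ordered points, computed positionally: each output slot t maps by a
--     closed-form index formula to one input point (no grid, no appends, no
--     list reversal)."""
--     nrows = row_size - 1
--     ncols = col_size - 1
--     if nrows <= 0 or ncols <= 0:
--         return []
--     length = 7 * nrows
--     out = []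
--     for t in range(length * ncols):
--         col, p = divmod(t, length)
--         if col % 2 == 1:
--             p = length - 1 - p
--         cell, k = divmod(p, 7)
--         dc, dr = _OFF[k]
--         out.append(points[(col + dc) * row_size + cell + dr])
--     return out
-- ===== Notes on version B (the rewrite author's own statement) =====
-- stated objective: alternative
-- what changed: B replaces A's two-stage construction (build a 2D grid, then run a while-loop left_half/forward toggle state machine with per-column list reversal) by a positional closed form: one loop over output slots t that computes the source index directly via divmod (column = t // (7*(row_size-1)), odd columns read their segment back-to-front by index arithmetic, cell/corner from divmod by 7 and a fixed offset table), so no intermediate grid, no extend/append of sublists and no reverse() pass exist.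
import Mathlib
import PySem

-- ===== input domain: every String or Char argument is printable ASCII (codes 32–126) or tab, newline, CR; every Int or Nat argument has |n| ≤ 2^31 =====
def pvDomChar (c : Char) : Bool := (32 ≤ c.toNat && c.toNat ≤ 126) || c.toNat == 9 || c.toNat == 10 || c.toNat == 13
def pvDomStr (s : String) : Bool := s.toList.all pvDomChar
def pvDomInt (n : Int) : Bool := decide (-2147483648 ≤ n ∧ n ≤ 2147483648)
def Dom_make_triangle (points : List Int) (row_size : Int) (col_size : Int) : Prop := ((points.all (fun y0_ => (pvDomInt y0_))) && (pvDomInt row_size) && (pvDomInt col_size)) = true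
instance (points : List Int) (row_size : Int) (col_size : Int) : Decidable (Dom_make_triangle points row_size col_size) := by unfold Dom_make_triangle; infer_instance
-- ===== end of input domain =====

-- B replaces A's grid + while-loop toggle state machine by a positional closed form:
-- one loop over output slots, each slot's source index computed by divmod arithmetic
-- (odd columns read back-to-front by index arithmetic, no reverse pass) — alternative.

-- ===== PORT A =====
-- the inner 'while row_idx < row_size - 1' state machine of A, transliterated
def pvTriWhile (points2d : List (List Int)) (col_idx row_size : Int)
    (row_idx : Int) (left_half : Bool) (tri : List Int) : List Int :=
  if h : row_idx < row_size - 1 then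
    if h2 : left_half then
      pvTriWhile points2d col_idx row_size row_idx false
        (tri ++ [PySem.List.pyGetD (PySem.List.pyGetD points2d (col_idx + 1) []) row_idx 0,
                 PySem.List.pyGetD (PySem.List.pyGetD points2d col_idx []) row_idx 0,
                 PySem.List.pyGetD (PySem.List.pyGetD points2d col_idx []) (row_idx + 1) 0,
                 PySem.List.pyGetD (PySem.List.pyGetD points2d (col_idx + 1) []) row_idx 0])
    else
      pvTriWhile points2d col_idx row_size (row_idx + 1) true
        (tri ++ [PySem.List.pyGetD (PySem.List.pyGetD points2d col_idx []) (row_idx + 1) 0,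
                 PySem.List.pyGetD (PySem.List.pyGetD points2d (col_idx + 1) []) (row_idx + 1) 0,
                 PySem.List.pyGetD (PySem.List.pyGetD points2d (col_idx + 1) []) row_idx 0])
  else tri
termination_by (row_size - 1 - row_idx).toNat * 2 + (if left_half then 1 else 0)
decreasing_by
  all_goals first | (simp [h2]; omega) | simp [h2]

def make_triangle (points : List Int) (row_size : Int) (col_size : Int) : List Int :=
  let points2d : List (List Int) :=
    (PySem.List.pyRange 0 col_size 1).foldl (fun acc i =>
      acc ++ [(PySem.List.pyRange 0 row_size 1).foldl (fun row j =>
        row ++ [PySem.List.pyGetD points (j + i * row_size) 0]) []]) []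
  let st : Bool × List Int :=
    (PySem.List.pyRange 0 (col_size - 1) 1).foldl (fun st col_idx =>
      let tri_list := pvTriWhile points2d col_idx row_size 0 true []
      if st.1 then (false, st.2 ++ tri_list) else (true, st.2 ++ tri_list.reverse))
      (true, [])
  st.2

-- ===== PORT B =====
-- the body of Source B's slot loop: the closed-form output-position → input-index map
def pvSlot (points : List Int) (row_size L t : Int) : Int :=
  let col := PySem.Int.floordiv t L
  let p0 := PySem.Int.mod t L
  let p := if PySem.Int.mod col 2 == 1 then L - 1 - p0 else p0
  let cell := PySem.Int.floordiv p 7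
  let k := PySem.Int.mod p 7
  let o := PySem.List.pyGetD [((1:Int),(0:Int)),(0,0),(0,1),(1,0),(0,1),(1,1),(1,0)] k (0,0)
  PySem.List.pyGetD points ((col + o.1) * row_size + cell + o.2) 0

def make_triangle_alt (points : List Int) (row_size : Int) (col_size : Int) : List Int :=
  let nrows := row_size - 1
  let ncols := col_size - 1
  if nrows ≤ 0 ∨ ncols ≤ 0 then []
  else
    let L := 7 * nrows
    (PySem.List.pyRange 0 (L * ncols) 1).foldl
      (fun out t => out ++ [pvSlot points row_size L t]) []

-- ===== PRECONDITION & SPEC =====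
-- Pre_ excludes exactly the inputs on which Python A raises IndexError: it indexes
-- points[0 .. col_size*row_size - 1] while building its grid, so it raises iff
-- both sizes are positive and the flat list is shorter than col_size*row_size.
def Pre_make_triangle (points : List Int) (row_size : Int) (col_size : Int) : Prop :=
  col_size ≤ 0 ∨ row_size ≤ 0 ∨ col_size * row_size ≤ (points.length : Int)
instance (points : List Int) (row_size : Int) (col_size : Int) : Decidable (Pre_make_triangle points row_size col_size) := by unfold Pre_make_triangle; infer_instance
def pvWitness_make_triangle : List Int × Int × Int := ([1, 2, 3, 4, 5, 6], 2, 3)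

def Spec_make_triangle (points : List Int) (row_size : Int) (col_size : Int) (out : List Int) : Prop := out = make_triangle_alt points row_size col_size
instance (points : List Int) (row_size : Int) (col_size : Int) (out : List Int) : Decidable (Spec_make_triangle points row_size col_size out) := by unfold Spec_make_triangle; infer_instance

-- ===== CLAIM (what is proved, stated in full; the proofs are below) =====
def Claim_equal_make_triangle : Prop := ∀ (points : List Int) (row_size : Int) (col_size : Int), Dom_make_triangle points row_size col_size → Pre_make_triangle points row_size col_size → Spec_make_triangle points row_size col_size (make_triangle points row_size col_size)

-- ===== LEMMAS AND PROOFS =====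

-- the 7 points A emits for cell (c, r), and the reference list both programs compute
def pvSeven (points : List Int) (rs c : Int) (r : Int) : List Int :=
  [PySem.List.pyGetD points (c * rs + rs + r) 0,
   PySem.List.pyGetD points (c * rs + r) 0,
   PySem.List.pyGetD points (c * rs + r + 1) 0,
   PySem.List.pyGetD points (c * rs + rs + r) 0,
   PySem.List.pyGetD points (c * rs + r + 1) 0,
   PySem.List.pyGetD points (c * rs + rs + r + 1) 0,
   PySem.List.pyGetD points (c * rs + rs + r) 0]

def pvCol (points : List Int) (rs c : Int) : List Int :=
  (PySem.List.pyRange 0 (rs - 1) 1).flatMap (pvSeven points rs c)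

def pvRef (points : List Int) (rs cs : Int) : List Int :=
  (PySem.List.pyRange 0 (cs - 1) 1).flatMap (fun c =>
    if PySem.Int.mod c 2 == 1 then (pvCol points rs c).reverse else pvCol points rs c)

-- pvCell: pvSlot after the column has been peeled off (input is the in-column offset p)
def pvCell (points : List Int) (rs c p : Int) : Int :=
  let cell := PySem.Int.floordiv p 7
  let k := PySem.Int.mod p 7
  let o := PySem.List.pyGetD [((1:Int),(0:Int)),(0,0),(0,1),(1,0),(0,1),(1,1),(1,0)] k (0,0)
  PySem.List.pyGetD points ((c + o.1) * rs + cell + o.2) 0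

-- ---- A side ----
def pvGrid (points : List Int) (rs cs : Int) : List (List Int) :=
  (PySem.List.pyRange 0 cs 1).map (fun i =>
    (PySem.List.pyRange 0 rs 1).map (fun j => PySem.List.pyGetD points (j + i * rs) 0))

theorem pvGrid_eq (points : List Int) (rs cs : Int) :
    (PySem.List.pyRange 0 cs 1).foldl (fun acc i =>
      acc ++ [(PySem.List.pyRange 0 rs 1).foldl (fun row j =>
        row ++ [PySem.List.pyGetD points (j + i * rs) 0]) []]) []
    = pvGrid points rs cs := by
  simp only [PySem.List.foldl_append_singleton_eq_map, List.nil_append, pvGrid]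

theorem pvGrid_get (points : List Int) (rs cs : Int) {c r : Int}
    (hc0 : 0 ≤ c) (hc1 : c < cs) (hr0 : 0 ≤ r) (hr1 : r < rs) :
    PySem.List.pyGetD (PySem.List.pyGetD (pvGrid points rs cs) c []) r 0
      = PySem.List.pyGetD points (r + c * rs) 0 := by
  unfold pvGrid
  rw [PySem.List.pyGetD_map_pyRange_of_nonneg _ _ _ _ hc0 hc1,
      PySem.List.pyGetD_map_pyRange_of_nonneg _ _ _ _ hr0 hr1]

theorem pvTriWhile_eq (points : List Int) (rs cs c : Int) (hc0 : 0 ≤ c) (hc1 : c + 1 < cs) :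
    ∀ (n : ℕ) (r : Int), (rs - 1 - r).toNat = n → 0 ≤ r → ∀ t,
    pvTriWhile (pvGrid points rs cs) c rs r true t
      = t ++ (PySem.List.pyRange r (rs - 1) 1).flatMap (pvSeven points rs c) := by
  intro n
  induction n with
  | zero =>
    intro r hn hr t
    rw [pvTriWhile, dif_neg (by omega), PySem.List.pyRange_one_eq_nil (by omega)]
    simp
  | succ m ih =>
    intro r hn hr t
    have hlt : r < rs - 1 := by omega
    rw [pvTriWhile, dif_pos hlt, dif_pos rfl, pvTriWhile, dif_pos hlt, dif_neg (by simp),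
        ih (r + 1) (by omega) (by omega),
        PySem.List.pyRange_one_cons hlt, List.flatMap_cons,
        pvGrid_get points rs cs (by omega) (by omega) hr (by omega),
        pvGrid_get points rs cs hc0 (by omega) hr (by omega),
        pvGrid_get points rs cs hc0 (by omega) (by omega) (by omega),
        pvGrid_get points rs cs (by omega) (by omega) (by omega) (by omega)]
    have e1 : r + (c + 1) * rs = c * rs + rs + r := by ring
    have e2 : r + c * rs = c * rs + r := by ring
    have e3 : r + 1 + c * rs = c * rs + r + 1 := by ring
    have e4 : r + 1 + (c + 1) * rs = c * rs + rs + (r + 1) := by ring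
    have e5 : c * rs + rs + r + 1 = c * rs + rs + (r + 1) := by ring
    rw [e1, e2, e3, e4]
    simp [pvSeven, e5]

theorem pvA_outer (points : List Int) (rs cs : Int) :
    ∀ (n : ℕ) (a : Int), (cs - 1 - a).toNat = n → 0 ≤ a → ∀ trs : List Int,
    ((PySem.List.pyRange a (cs - 1) 1).foldl (fun st col_idx =>
        if st.1 then (false, st.2 ++ pvTriWhile (pvGrid points rs cs) col_idx rs 0 true [])
        else (true, st.2 ++ (pvTriWhile (pvGrid points rs cs) col_idx rs 0 true []).reverse))
      (decide (a % 2 = 0), trs)).2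
    = trs ++ (PySem.List.pyRange a (cs - 1) 1).flatMap (fun c =>
        if PySem.Int.mod c 2 == 1 then (pvCol points rs c).reverse else pvCol points rs c) := by
  intro n
  induction n with
  | zero =>
    intro a hn ha trs
    rw [PySem.List.pyRange_one_eq_nil (by omega)]
    simp
  | succ m ih =>
    intro a hn ha trs
    have hlt : a < cs - 1 := by omega
    have hm : PySem.Int.mod a 2 = a % 2 := PySem.Int.mod_eq_emod_of_pos (by norm_num)
    have hw : pvTriWhile (pvGrid points rs cs) a rs 0 true [] = pvCol points rs a := by
      rw [pvTriWhile_eq points rs cs a ha (by omega) (rs - 1 - 0).toNat 0 rfl le_rfl]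
      simp [pvCol]
    rw [PySem.List.pyRange_one_cons hlt]
    simp only [List.foldl_cons, List.flatMap_cons, hm]
    rw [hw]
    by_cases hp : a % 2 = 0
    · rw [show decide (a % 2 = 0) = true from by simp [hp]]
      rw [if_pos rfl, if_neg (by simp [hp])]
      have hih := ih (a + 1) (by omega) (by omega) (trs ++ pvCol points rs a)
      rw [show decide ((a + 1) % 2 = 0) = false from by simp; omega] at hih
      rw [hih, List.append_assoc]
    · rw [show decide (a % 2 = 0) = false from by simp [hp]]
      rw [if_neg (by simp), if_pos (by simp; omega)]
      have hih := ih (a + 1) (by omega) (by omega) (trs ++ (pvCol points rs a).reverse)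
      rw [show decide ((a + 1) % 2 = 0) = true from by simp; omega] at hih
      rw [hih, List.append_assoc]

theorem pvA_eq_ref (points : List Int) (rs cs : Int) :
    make_triangle points rs cs = pvRef points rs cs := by
  unfold make_triangle
  simp only [pvGrid_eq]
  have h := pvA_outer points rs cs (cs - 1 - 0).toNat 0 rfl le_rfl []
  simpa [pvRef] using h

-- ---- B side ----

-- reading List.range back-to-front is reversing the forward read
theorem pvRevRange (f : Int → Int) :
    ∀ (n : ℕ), (List.range n).map (fun (k : ℕ) => f ((n : Int) - 1 - (k : Int)))
      = ((List.range n).map (fun (k : ℕ) => f (k : Int))).reverse := by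
  intro n
  induction n generalizing f with
  | zero => simp
  | succ m ih =>
    have hA : (List.range (m + 1)).map (fun (k : ℕ) => f (((m + 1 : ℕ) : Int) - 1 - (k : Int)))
        = f (m : Int) :: (List.range m).map (fun (k : ℕ) => f ((m : Int) - 1 - (k : Int))) := by
      rw [List.range_succ_eq_map]
      simp only [List.map_cons, List.map_map]
      congr 1
      · push_cast; ring_nf
      · apply List.map_congr_left
        intro x _
        simp only [Function.comp_def]
        push_cast
        ring_nf
    have hB : ((List.range (m + 1)).map (fun (k : ℕ) => f (k : Int))).reverse
        = f (m : Int) :: ((List.range m).map (fun (k : ℕ) => f (k : Int))).reverse := by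
      rw [List.range_succ]; simp
    rw [hA, hB, ih]

theorem pvCell_chunk (points : List Int) (rs c : Int) (m : Int) :
    (PySem.List.pyRange (7 * m) (7 * m + 7) 1).map (pvCell points rs c)
      = pvSeven points rs c m := by
  rw [PySem.List.pyRange_one_cons (by omega), PySem.List.pyRange_one_cons (by omega),
      PySem.List.pyRange_one_cons (by omega), PySem.List.pyRange_one_cons (by omega),
      PySem.List.pyRange_one_cons (by omega), PySem.List.pyRange_one_cons (by omega),
      PySem.List.pyRange_one_cons (by omega), PySem.List.pyRange_one_eq_nil (by omega)]
  have hdiv : ∀ k : Int, 0 ≤ k → k < 7 → PySem.Int.floordiv (7 * m + k) 7 = m := by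
    intro k h0 h1
    rw [PySem.Int.floordiv_eq_iff_of_pos (by norm_num)]
    omega
  have hmod : ∀ k : Int, 0 ≤ k → k < 7 → PySem.Int.mod (7 * m + k) 7 = k := by
    intro k h0 h1
    have := PySem.Int.floordiv_mul_add_mod (7 * m + k) 7
    rw [hdiv k h0 h1] at this
    omega
  simp only [List.map_cons, List.map_nil, pvCell]
  rw [show (7 * m + 1 + 1 : Int) = 7 * m + 2 by ring,
      show (7 * m + 2 + 1 : Int) = 7 * m + 3 by ring,
      show (7 * m + 3 + 1 : Int) = 7 * m + 4 by ring,
      show (7 * m + 4 + 1 : Int) = 7 * m + 5 by ring,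
      show (7 * m + 5 + 1 : Int) = 7 * m + 6 by ring]
  rw [hdiv 1 (by norm_num) (by norm_num), hmod 1 (by norm_num) (by norm_num),
      hdiv 2 (by norm_num) (by norm_num), hmod 2 (by norm_num) (by norm_num),
      hdiv 3 (by norm_num) (by norm_num), hmod 3 (by norm_num) (by norm_num),
      hdiv 4 (by norm_num) (by norm_num), hmod 4 (by norm_num) (by norm_num),
      hdiv 5 (by norm_num) (by norm_num), hmod 5 (by norm_num) (by norm_num),
      hdiv 6 (by norm_num) (by norm_num), hmod 6 (by norm_num) (by norm_num)]
  rw [show (7 * m : Int) = 7 * m + 0 by ring]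
  rw [hdiv 0 (by norm_num) (by norm_num), hmod 0 (by norm_num) (by norm_num)]
  simp [pvSeven, PySem.List.pyGetD]
  ring_nf
  exact ⟨trivial, trivial, trivial⟩

theorem pvCell_cols (points : List Int) (rs c : Int) :
    ∀ (n : ℕ) (m : Int), 0 ≤ m → (rs - 1 - m).toNat = n →
    (PySem.List.pyRange (7 * m) (7 * (rs - 1)) 1).map (pvCell points rs c)
      = (PySem.List.pyRange m (rs - 1) 1).flatMap (pvSeven points rs c) := by
  intro n
  induction n with
  | zero =>
    intro m hm hn
    rw [PySem.List.pyRange_one_eq_nil (by omega), PySem.List.pyRange_one_eq_nil (by omega)]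
    simp
  | succ d ih =>
    intro m hm hn
    have hlt : m < rs - 1 := by omega
    rw [PySem.List.pyRange_one_append (7 * m) (7 * m + 7) (7 * (rs - 1)) (by omega) (by omega),
        List.map_append, pvCell_chunk,
        show (7 * m + 7 : Int) = 7 * (m + 1) by ring,
        ih (m + 1) (by omega) (by omega),
        PySem.List.pyRange_one_cons hlt, List.flatMap_cons]

theorem pvColMap (points : List Int) (rs c : Int) :
    (List.range (7 * (rs - 1)).toNat).map (fun (k : ℕ) => pvCell points rs c (k : Int))
      = pvCol points rs c := by
  have h := pvCell_cols points rs c (rs - 1 - 0).toNat 0 (by norm_num) rfl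
  rw [show (7 * (0 : Int)) = 0 by ring] at h
  unfold pvCol
  rw [← h, PySem.List.pyRange_one, List.map_map]
  simp [Function.comp_def]

theorem pvSlot_seg (points : List Int) (rs c L : Int) (hL : 0 < L)
    (k : Int) (hk0 : 0 ≤ k) (hk1 : k < L) :
    pvSlot points rs L (c * L + k)
      = (if PySem.Int.mod c 2 == 1 then pvCell points rs c (L - 1 - k)
         else pvCell points rs c k) := by
  have hdiv : PySem.Int.floordiv (c * L + k) L = c := by
    rw [PySem.Int.floordiv_eq_iff_of_pos hL]
    constructor <;> nlinarith
  have hmod : PySem.Int.mod (c * L + k) L = k := by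
    have := PySem.Int.floordiv_mul_add_mod (c * L + k) L
    rw [hdiv] at this
    omega
  simp only [pvSlot, pvCell, hdiv, hmod]
  split <;> rfl

theorem pvB_cols (points : List Int) (rs cs : Int) (hrs : 0 < rs - 1) :
    ∀ (n : ℕ) (a : Int), 0 ≤ a → (cs - 1 - a).toNat = n →
    (PySem.List.pyRange (a * (7 * (rs - 1))) ((7 * (rs - 1)) * (cs - 1)) 1).map
        (pvSlot points rs (7 * (rs - 1)))
      = (PySem.List.pyRange a (cs - 1) 1).flatMap (fun c =>
          if PySem.Int.mod c 2 == 1 then (pvCol points rs c).reverse else pvCol points rs c) := by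
  intro n
  induction n with
  | zero =>
    intro a ha hn
    have hL : (0 : Int) ≤ 7 * (rs - 1) := by omega
    have h1 : (cs - 1) * (7 * (rs - 1)) ≤ a * (7 * (rs - 1)) :=
      mul_le_mul_of_nonneg_right (by omega) hL
    rw [PySem.List.pyRange_one_eq_nil (by nlinarith), PySem.List.pyRange_one_eq_nil (by omega)]
    simp
  | succ d ih =>
    intro a ha hn
    have hL : (0 : Int) < 7 * (rs - 1) := by omega
    have hlt : a < cs - 1 := by omega
    have hseg : (PySem.List.pyRange (a * (7 * (rs - 1))) (a * (7 * (rs - 1)) + 7 * (rs - 1)) 1).map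
        (pvSlot points rs (7 * (rs - 1)))
        = (if PySem.Int.mod a 2 == 1 then (pvCol points rs a).reverse else pvCol points rs a) := by
      rw [PySem.List.pyRange_one, List.map_map,
          show (a * (7 * (rs - 1)) + 7 * (rs - 1) - a * (7 * (rs - 1))) = 7 * (rs - 1) by ring]
      have hmc : ((List.range (7 * (rs - 1)).toNat).map
            ((pvSlot points rs (7 * (rs - 1))) ∘ (fun (k : ℕ) => a * (7 * (rs - 1)) + (k : Int))))
          = (List.range (7 * (rs - 1)).toNat).map (fun (k : ℕ) =>
              if PySem.Int.mod a 2 == 1 then pvCell points rs a ((7 * (rs - 1)) - 1 - (k : Int))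
              else pvCell points rs a (k : Int)) := by
        apply List.map_congr_left
        intro x hx
        simp only [Function.comp_def]
        exact pvSlot_seg points rs a (7 * (rs - 1)) hL x (by positivity)
          (by have := List.mem_range.mp hx; omega)
      rw [hmc]
      cases hp : (PySem.Int.mod a 2 == 1) with
      | true =>
        simp only [if_true]
        have hrv := pvRevRange (fun p => pvCell points rs a p) (7 * (rs - 1)).toNat
        rw [show (((7 * (rs - 1)).toNat : Int)) = 7 * (rs - 1) by omega] at hrv
        rw [hrv, pvColMap points rs a]
      | false =>
        simp only [Bool.false_eq_true, if_false]
        exact pvColMap points rs a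
    rw [PySem.List.pyRange_one_append (a * (7 * (rs - 1))) (a * (7 * (rs - 1)) + 7 * (rs - 1))
          ((7 * (rs - 1)) * (cs - 1)) (by omega) (by nlinarith),
        List.map_append, hseg,
        show (a * (7 * (rs - 1)) + 7 * (rs - 1) : Int) = (a + 1) * (7 * (rs - 1)) by ring,
        ih (a + 1) (by omega) (by omega),
        PySem.List.pyRange_one_cons hlt, List.flatMap_cons]

theorem pvB_eq_ref (points : List Int) (rs cs : Int) :
    make_triangle_alt points rs cs = pvRef points rs cs := by
  unfold make_triangle_alt
  by_cases h : rs - 1 ≤ 0 ∨ cs - 1 ≤ 0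
  · rw [if_pos h]
    unfold pvRef
    rcases h with h | h
    · have : ∀ c, pvCol points rs c = [] := by
        intro c; unfold pvCol
        rw [PySem.List.pyRange_one_eq_nil (by omega)]; rfl
      simp [this]
    · rw [PySem.List.pyRange_one_eq_nil (by omega)]; rfl
  · rw [if_neg h]
    have hrs : 0 < rs - 1 := by omega
    have hcs : 0 < cs - 1 := by omega
    rw [PySem.List.foldl_append_singleton_eq_map, List.nil_append]
    have h := pvB_cols points rs cs (by omega) (cs - 1 - 0).toNat 0 le_rfl rfl
    rw [show ((0 : Int) * (7 * (rs - 1))) = 0 by ring] at h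
    rw [h]
    rfl

-- ===== VERDICT (by name: the statement is the Claim_ definition above) =====
theorem make_triangle_spec : Claim_equal_make_triangle := by
  intro points rs cs _ _
  unfold Spec_make_triangle
  rw [pvA_eq_ref, pvB_eq_ref]
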